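-- pv_equiv track=rewrite | github.com/BBariOxit/Tutorial-Python | tutorial/Bài 2/Functions.py | LaySoLonThu2
-- ===== SOURCE A (Python) =====
-- def LaySoLonThu2(Ds):
--     numMax = max(Ds)
--     # newDs = [i for i in Ds if i != numMax]
--     newDs = []
--     for i in Ds:
--         if i != numMax:
--             newDs.append(i)
--     SoLonNhi = max(newDs)
--     # newDs2 = [i for i in newDs if i == SoLonNhi]
--     newDs2 = []
--     for i in newDs:
--         if i == SoLonNhi:
--             newDs2.append(i)
--     return newDs2
-- ===== SOURCE B (Python) =====
-- def LaySoLonThu2(Ds):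
--     # One online pass: running maximum m1 (with its count c1) and the largest
--     # value strictly below it m2 (with its count c2). [m2]*c2 is the answer.
--     m1 = None; c1 = 0
--     m2 = None; c2 = 0
--     for x in Ds:
--         if m1 is None:
--             m1, c1 = x, 1
--         elif x > m1:
--             m2, c2 = m1, c1   # old maximum is demoted; it beats any current m2
--             m1, c1 = x, 1
--         elif x == m1:
--             c1 += 1
--         elif m2 is None or x > m2:
--             m2, c2 = x, 1
--         elif x == m2:
--             c2 += 1
--     if m2 is None:
--         raise ValueError("no value below the maximum")
--     return [m2] * c2
-- ===== Notes on version B (the rewrite author's own statement) =====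
-- stated objective: alternative
-- what changed: Replaces A's three sequential passes (max, filter-out-max into a new list, filter-equal-to-second-max into another list) by a single online scan maintaining the running maximum and the second-largest distinct value with their multiplicities, returning [m2]*c2.
import Mathlib
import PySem

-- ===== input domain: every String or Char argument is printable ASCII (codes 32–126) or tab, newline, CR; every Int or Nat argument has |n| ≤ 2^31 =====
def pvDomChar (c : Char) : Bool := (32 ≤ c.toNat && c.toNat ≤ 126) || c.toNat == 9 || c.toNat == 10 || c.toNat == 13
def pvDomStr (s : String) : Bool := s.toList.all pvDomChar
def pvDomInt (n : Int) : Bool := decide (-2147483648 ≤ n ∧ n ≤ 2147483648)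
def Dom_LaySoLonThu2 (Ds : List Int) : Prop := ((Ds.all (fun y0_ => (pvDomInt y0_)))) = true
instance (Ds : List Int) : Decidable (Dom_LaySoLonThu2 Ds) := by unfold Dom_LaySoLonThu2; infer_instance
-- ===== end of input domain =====

-- B replaces A's three sequential passes (max, filter-out-max, filter-equal-second-max)
-- by a single online scan tracking the running maximum and the second-largest distinct
-- value with their multiplicities (alternative decomposition, same return value).


-- ===== PORT A =====
def LaySoLonThu2 (Ds : List Int) : List Int :=
  match PySem.List.max? Ds (fun y => y) with
  | none => []   -- max(Ds) raises ValueError on empty input; excluded by Pre_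
  | some numMax =>
    let newDs := Ds.foldl (fun acc i => if i != numMax then acc ++ [i] else acc) []
    match PySem.List.max? newDs (fun y => y) with
    | none => []   -- max(newDs) raises ValueError when all elements are equal; excluded by Pre_
    | some SoLonNhi =>
      newDs.foldl (fun acc i => if i == SoLonNhi then acc ++ [i] else acc) []

-- ===== PORT B =====
-- state: (running max m1, its count c1, best value strictly below m1, its count c2)
def pvAltStep (st : Option Int × Int × Option Int × Int) (x : Int) :
    Option Int × Int × Option Int × Int :=
  match st with
  | (none, _c1, m2, c2) => (some x, 1, m2, c2)
  | (some m1, c1, m2, c2) =>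
    if m1 < x then (some x, 1, some m1, c1)
    else if x == m1 then (some m1, c1 + 1, m2, c2)
    else
      match m2 with
      | none => (some m1, c1, some x, 1)
      | some s =>
        if s < x then (some m1, c1, some x, 1)
        else if x == s then (some m1, c1, some s, c2 + 1)
        else (some m1, c1, some s, c2)

def LaySoLonThu2_alt (Ds : List Int) : List Int :=
  match Ds.foldl pvAltStep (none, 0, none, 0) with
  | (_, _, none, _) => []   -- Python B raises ValueError here; excluded by Pre_
  | (_, _, some s, c2) => PySem.List.pyRepeat [s] c2

-- ===== PRECONDITION & SPEC =====
-- A raises ValueError (max of an empty sequence) on the empty list and on all-equal lists; B raises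
-- there too, so Pre_ admits exactly the lists with at least two distinct values.
def Pre_LaySoLonThu2 (Ds : List Int) : Prop := ∃ a ∈ Ds, ∃ b ∈ Ds, a ≠ b
instance (Ds : List Int) : Decidable (Pre_LaySoLonThu2 Ds) := by unfold Pre_LaySoLonThu2; infer_instance
def pvWitness_LaySoLonThu2 : List Int := [1, 2, 2]

def Spec_LaySoLonThu2 (Ds : List Int) (out : List Int) : Prop := out = LaySoLonThu2_alt Ds
instance (Ds : List Int) (out : List Int) : Decidable (Spec_LaySoLonThu2 Ds out) := by unfold Spec_LaySoLonThu2; infer_instance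

-- ===== CLAIM (what is proved, stated in full; the proofs are below) =====
def Claim_equal_LaySoLonThu2 : Prop := ∀ (Ds : List Int), Dom_LaySoLonThu2 Ds → Pre_LaySoLonThu2 Ds → Spec_LaySoLonThu2 Ds (LaySoLonThu2 Ds)

-- ===== LEMMAS AND PROOFS =====

-- Invariant of B's scan after processing the prefix p.
def pvInv (p : List Int) (st : Option Int × Int × Option Int × Int) : Prop :=
  ∃ m1, st.1 = some m1 ∧ m1 ∈ p ∧ (∀ y ∈ p, y ≤ m1) ∧
    st.2.1 = (p.count m1 : Int) ∧
    ((st.2.2.1 = none ∧ ∀ y ∈ p, ¬ y < m1) ∨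
     (∃ s, st.2.2.1 = some s ∧ s ∈ p ∧ s < m1 ∧ (∀ y ∈ p, y < m1 → y ≤ s) ∧
       st.2.2.2 = (p.count s : Int)))

lemma pvInv_step (p : List Int) (st : Option Int × Int × Option Int × Int) (x : Int)
    (h : pvInv p st) : pvInv (p ++ [x]) (pvAltStep st x) := by
  obtain ⟨m1, h1, hmem, hle, hc1, hrest⟩ := h
  obtain ⟨o1, c1, o2, c2⟩ := st
  simp only at h1 hc1 hrest
  subst h1; subst hc1
  by_cases hx1 : m1 < x
  · -- new maximum x; old m1 becomes the second value
    have hxnot : x ∉ p := fun hx => absurd (hle x hx) (not_le.mpr hx1)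
    have hne : m1 ≠ x := ne_of_lt hx1
    refine ⟨x, by simp [pvAltStep, hx1], by simp, ?_, ?_, Or.inr ⟨m1, by simp [pvAltStep, hx1], by simp [hmem], hx1, ?_, ?_⟩⟩
    · intro y hy
      rcases List.mem_append.mp hy with hy | hy
      · exact le_of_lt (lt_of_le_of_lt (hle y hy) hx1)
      · simp at hy; omega
    · simp [pvAltStep, hx1, List.count_append, List.count_eq_zero_of_not_mem hxnot]
    · intro y hy hylt
      rcases List.mem_append.mp hy with hy | hy
      · exact hle y hy
      · simp at hy; omega
    · simp [pvAltStep, hx1, List.count_append, List.count_singleton]; omega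
  · by_cases hx2 : x = m1
    · -- another copy of the maximum
      subst hx2
      refine ⟨x, by simp [pvAltStep, hx1], by simp [hmem], ?_, ?_, ?_⟩
      · intro y hy
        rcases List.mem_append.mp hy with hy | hy
        · exact hle y hy
        · simp at hy; omega
      · simp [pvAltStep, hx1, List.count_append]
      · rcases hrest with ⟨ho2, hnone⟩ | ⟨s, ho2, hsmem, hslt, hsmax, hc2⟩
        · subst ho2
          refine Or.inl ⟨by simp [pvAltStep, hx1], ?_⟩
          intro y hy
          rcases List.mem_append.mp hy with hy | hy
          · exact hnone y hy
          · simp at hy; omega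
        · subst ho2
          have hne : s ≠ x := ne_of_lt hslt
          refine Or.inr ⟨s, by simp [pvAltStep, hx1], by simp [hsmem], hslt, ?_, ?_⟩
          · intro y hy hylt
            rcases List.mem_append.mp hy with hy | hy
            · exact hsmax y hy hylt
            · simp at hy; omega
          · have hne' : x ≠ s := Ne.symm hne
            simp [pvAltStep, hx1, List.count_append, List.count_singleton, hne', hc2]
    · -- x strictly below the maximum
      have hxlt : x < m1 := by omega
      have hnem : m1 ≠ x := fun h => hx2 h.symm
      have hm1 : m1 ∈ p ++ [x] := List.mem_append.mpr (Or.inl hmem)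
      have hlem : ∀ y ∈ p ++ [x], y ≤ m1 := by
        intro y hy
        rcases List.mem_append.mp hy with hy | hy
        · exact hle y hy
        · simp at hy; omega
      rcases hrest with ⟨ho2, hnone⟩ | ⟨s, ho2, hsmem, hslt, hsmax, hc2⟩
      · subst ho2
        have hxnot : x ∉ p := fun hx => hnone x hx hxlt
        refine ⟨m1, by simp [pvAltStep, hx1, hx2], hm1, hlem, by simp [pvAltStep, hx1, hx2, List.count_append, List.count_singleton], Or.inr ⟨x, by simp [pvAltStep, hx1, hx2], by simp, hxlt, ?_, ?_⟩⟩
        · intro y hy hylt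
          rcases List.mem_append.mp hy with hy | hy
          · exact absurd hylt (hnone y hy)
          · simp at hy; omega
        · simp [pvAltStep, hx1, hx2, List.count_append, List.count_eq_zero_of_not_mem hxnot]
      · subst ho2
        by_cases hx3 : s < x
        · have hxnot : x ∉ p := fun hx => absurd (hsmax x hx hxlt) (not_le.mpr hx3)
          refine ⟨m1, by simp [pvAltStep, hx1, hx2, hx3], hm1, hlem, by simp [pvAltStep, hx1, hx2, hx3, List.count_append, List.count_singleton], Or.inr ⟨x, by simp [pvAltStep, hx1, hx2, hx3], by simp, hxlt, ?_, ?_⟩⟩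
          · intro y hy hylt
            rcases List.mem_append.mp hy with hy | hy
            · exact le_of_lt (lt_of_le_of_lt (hsmax y hy hylt) hx3)
            · simp at hy; omega
          · simp [pvAltStep, hx1, hx2, hx3, List.count_append, List.count_eq_zero_of_not_mem hxnot]
        · by_cases hx4 : x = s
          · subst hx4
            refine ⟨m1, by simp [pvAltStep, hx1, hx2, hx3], hm1, hlem, by simp [pvAltStep, hx1, hx2, hx3, List.count_append, List.count_singleton], Or.inr ⟨x, by simp [pvAltStep, hx1, hx2, hx3], by simp, hxlt, ?_, ?_⟩⟩
            · intro y hy hylt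
              rcases List.mem_append.mp hy with hy | hy
              · exact hsmax y hy hylt
              · simp at hy; omega
            · simp [pvAltStep, hx1, hx2, hx3, List.count_append, hc2]
          · have hxs : x < s := by omega
            have hnes : s ≠ x := fun h => hx4 h.symm
            refine ⟨m1, by simp [pvAltStep, hx1, hx2, hx3, hx4], hm1, hlem, by simp [pvAltStep, hx1, hx2, hx3, hx4, List.count_append, List.count_singleton], Or.inr ⟨s, by simp [pvAltStep, hx1, hx2, hx3, hx4], by simp [hsmem], hslt, ?_, ?_⟩⟩
            · intro y hy hylt
              rcases List.mem_append.mp hy with hy | hy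
              · exact hsmax y hy hylt
              · simp at hy; omega
            · have hne' : x ≠ s := Ne.symm hnes
              simp [pvAltStep, hx1, hx2, hx3, hx4, List.count_append, List.count_singleton, hne', hc2]

lemma pvInv_foldl (l : List Int) : ∀ (p : List Int) st, pvInv p st →
    pvInv (p ++ l) (l.foldl pvAltStep st) := by
  induction l with
  | nil => intro p st h; simpa using h
  | cons x t ih =>
    intro p st h
    have := ih (p ++ [x]) (pvAltStep st x) (pvInv_step p st x h)
    simpa [List.foldl] using this

lemma pvInv_full (d : Int) (t : List Int) :
    pvInv (d :: t) ((d :: t).foldl pvAltStep (none, 0, none, 0)) := by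
  have h0 : pvInv [d] (pvAltStep (none, 0, none, 0) d) := by
    refine ⟨d, rfl, by simp, by simp, by simp [pvAltStep], Or.inl ⟨rfl, by simp⟩⟩
  have := pvInv_foldl t [d] _ h0
  simpa [List.foldl] using this

-- l.filter (· == s) is s repeated (l.count s) times  (cited: List.filter_beq)

-- ===== VERDICT (by name: the statement is the Claim_ definition above) =====
theorem LaySoLonThu2_spec : Claim_equal_LaySoLonThu2 := by
  intro Ds _hdom hpre
  obtain ⟨a, ha, b, hb, hab⟩ := hpre
  obtain ⟨d, t, rfl⟩ : ∃ d t, Ds = d :: t := by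
    cases Ds with
    | nil => simp at ha
    | cons d t => exact ⟨d, t, rfl⟩
  have hinv := pvInv_full d t
  obtain ⟨m1, h1, hmem, hle, hc1, hrest⟩ := hinv
  -- the second disjunct must hold: some element is strictly below m1
  have hsnd : ∃ s, ((d :: t).foldl pvAltStep (none, 0, none, 0)).2.2.1 = some s ∧
      s ∈ (d :: t) ∧ s < m1 ∧ (∀ y ∈ (d :: t), y < m1 → y ≤ s) ∧
      ((d :: t).foldl pvAltStep (none, 0, none, 0)).2.2.2 = ((d :: t).count s : Int) := by
    rcases hrest with ⟨_, hnone⟩ | hs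
    · exfalso
      have ha1 : a = m1 := le_antisymm (hle a ha) (not_lt.mp (hnone a ha))
      have hb1 : b = m1 := le_antisymm (hle b hb) (not_lt.mp (hnone b hb))
      exact hab (ha1.trans hb1.symm)
    · exact hs
  obtain ⟨s, hso, hsmem, hslt, hsmax, hc2⟩ := hsnd
  -- B's side reduces to replicate (count s) s
  have hst : (d :: t).foldl pvAltStep (none, 0, none, 0) =
      (some m1, (((d :: t).count m1 : Int)), some s, (((d :: t).count s : Int))) :=
    Prod.ext h1 (Prod.ext hc1 (Prod.ext hso hc2))
  have hB : LaySoLonThu2_alt (d :: t) = List.replicate ((d :: t).count s) s := by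
    simp [LaySoLonThu2_alt, hst, PySem.List.pyRepeat_singleton]
  -- A's side
  rcases hM : PySem.List.max? (d :: t) (fun y => y) with _ | M
  · exact absurd ((PySem.List.max?_eq_none_iff _ _).mp hM) (by simp)
  have hMmem := PySem.List.max?_mem hM
  have hMmax := PySem.List.max?_isMax hM
  have hMe : M = m1 := le_antisymm (hle M hMmem) (hMmax m1 hmem)
  rw [hMe] at hM
  have hsne : (s != m1) = true := by simp; omega
  have hsL : s ∈ (d :: t).filter (fun i => i != m1) := List.mem_filter.mpr ⟨hsmem, hsne⟩
  rcases hS : PySem.List.max? ((d :: t).filter (fun i => i != m1)) (fun y => y) with _ | S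
  · rw [(PySem.List.max?_eq_none_iff _ _).mp hS] at hsL; simp at hsL
  have hSmem := PySem.List.max?_mem hS
  have hSmax := PySem.List.max?_isMax hS
  have hSDs : S ∈ (d :: t) := (List.mem_filter.mp hSmem).1
  have hSne : S ≠ m1 := by
    have := (List.mem_filter.mp hSmem).2; simpa using this
  have hSlt : S < m1 := lt_of_le_of_ne (hle S hSDs) hSne
  have hSe : S = s := le_antisymm (hsmax S hSDs hSlt) (hSmax s hsL)
  rw [hSe] at hS
  have hA : LaySoLonThu2 (d :: t) = List.replicate ((d :: t).count s) s := by
    unfold LaySoLonThu2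
    rw [hM]
    simp only [PySem.List.foldl_append_if_eq_filter, List.nil_append] at hS ⊢
    rw [hS]
    show List.filter (fun x => x == s) (List.filter (fun x => x != m1) (d :: t)) = _
    rw [List.filter_beq, List.count_filter (p := fun x => x != m1) hsne]
  unfold Spec_LaySoLonThu2
  rw [hA, hB]
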